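-- pv_equiv track=rewrite | github.com/Sanskriti-hello/disco | ignore/backend/mcp_tools/google_workspace.py | _calculate_free_time
-- ===== SOURCE A (Python) =====
-- from typing import Dict, Any, List, Optional
--
-- def _calculate_free_time(
--
--     events: List[Dict],
--     time_min: str,
--     time_max: str
-- ) -> List[Dict[str, str]]:
--     """Calculate free time slots between events"""
--
--     if not events:
--         return [{
--             'start': time_min,
--             'end': time_max
--         }]
--
--     free_slots = []
--     prev_end = time_min
--
--     for event in events:
--         start = event['start'].get('dateTime', event['start'].get('date'))
--         if start > prev_end:
--             free_slots.append({
--                 'start': prev_end,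
--                 'end': start
--             })
--         prev_end = event['end'].get('dateTime', event['end'].get('date'))
--
--     # Add final free slot
--     if prev_end < time_max:
--         free_slots.append({
--             'start': prev_end,
--             'end': time_max
--         })
--
--     return free_slots
-- ===== SOURCE B (Python) =====
-- def _calculate_free_time(events, time_min, time_max):
--     """Free slots via recursion on adjacent event pairs (no running prev_end state)."""
--     if not events:
--         return [{'start': time_min, 'end': time_max}]
--
--     def when(event, key):
--         return event[key].get('dateTime', event[key].get('date'))
--
--     def slot(a, b):
--         return [{'start': a, 'end': b}] if a < b else []
--
--     def gaps(evs):
--         # evs is non-empty; emit the gap after each event by looking at the NEXT event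
--         if len(evs) == 1:
--             return slot(when(evs[0], 'end'), time_max)
--         return slot(when(evs[0], 'end'), when(evs[1], 'start')) + gaps(evs[1:])
--
--     return slot(time_min, when(events[0], 'start')) + gaps(events)
-- ===== Notes on version B (the rewrite author's own statement) =====
-- stated objective: alternative
-- what changed: Replaces A's stateful single pass carrying a running prev_end accumulator with a stateless structural recursion over adjacent event pairs: each step inspects two consecutive events and emits slot(end(e1), start(e2)), with boundary slots handled by separate base cases.
import Mathlib
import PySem

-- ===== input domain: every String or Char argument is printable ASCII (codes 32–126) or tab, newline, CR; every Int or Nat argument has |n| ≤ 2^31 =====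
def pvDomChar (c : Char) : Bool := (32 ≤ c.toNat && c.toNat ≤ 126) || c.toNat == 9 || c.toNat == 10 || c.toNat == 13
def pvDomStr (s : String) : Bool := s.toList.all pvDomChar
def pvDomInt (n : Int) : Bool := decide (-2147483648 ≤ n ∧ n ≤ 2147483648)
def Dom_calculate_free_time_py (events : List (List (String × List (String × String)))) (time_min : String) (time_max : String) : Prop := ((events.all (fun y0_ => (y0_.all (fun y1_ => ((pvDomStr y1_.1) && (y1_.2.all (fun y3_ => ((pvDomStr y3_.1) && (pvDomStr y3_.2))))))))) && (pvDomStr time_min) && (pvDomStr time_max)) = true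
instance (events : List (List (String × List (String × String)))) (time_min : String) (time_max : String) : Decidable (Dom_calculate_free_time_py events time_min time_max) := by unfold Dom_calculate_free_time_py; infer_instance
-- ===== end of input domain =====

-- B replaces A's stateful running-prev_end loop with a stateless structural recursion over
-- adjacent event pairs; same O(n) cost, different decomposition.

-- ===== PORT A =====
-- event[key].get('dateTime', event[key].get('date')); "" stands for the KeyError / None cases, which Pre_ excludes
def pvResolveA (event : List (String × List (String × String))) (key : String) : String :=
  match List.lookup key event with
  | none => ""
  | some d => ((List.lookup "dateTime" d).orElse (fun _ => List.lookup "date" d)).getD ""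

def calculate_free_time_py (events : List (List (String × List (String × String)))) (time_min : String) (time_max : String) : List (List (String × String)) :=
  if events.isEmpty then
    [[("start", time_min), ("end", time_max)]]
  else
    let st := events.foldl
      (fun (st : List (List (String × String)) × String) event =>
        let start := pvResolveA event "start"
        let slots := if st.2 < start then st.1 ++ [[("start", st.2), ("end", start)]] else st.1
        (slots, pvResolveA event "end"))
      ([], time_min)
    if st.2 < time_max then st.1 ++ [[("start", st.2), ("end", time_max)]] else st.1

-- ===== PORT B =====
-- B's when(event, key): same dict-resolution logic as in Source B
def pvWhenB (event : List (String × List (String × String))) (key : String) : String :=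
  match List.lookup key event with
  | none => ""
  | some d => ((List.lookup "dateTime" d).orElse (fun _ => List.lookup "date" d)).getD ""

-- B's slot(a, b)
def pvSlotB (a b : String) : List (List (String × String)) :=
  if a < b then [[("start", a), ("end", b)]] else []

-- B's gaps(evs): recursion on adjacent pairs
def pvGapsB (time_max : String) : List (List (String × List (String × String))) → List (List (String × String))
  | [] => []
  | [e] => pvSlotB (pvWhenB e "end") time_max
  | e1 :: e2 :: rest => pvSlotB (pvWhenB e1 "end") (pvWhenB e2 "start") ++ pvGapsB time_max (e2 :: rest)

def calculate_free_time_py_alt (events : List (List (String × List (String × String)))) (time_min : String) (time_max : String) : List (List (String × String)) :=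
  if events.isEmpty then
    [[("start", time_min), ("end", time_max)]]
  else
    match events with
    | [] => []
    | e :: _ => pvSlotB time_min (pvWhenB e "start") ++ pvGapsB time_max events

-- ===== PRECONDITION & SPEC =====
-- Pre_ excludes only inputs where Python A raises: a missing 'start'/'end' key (KeyError) or an
-- event whose resolved time is None (TypeError in the '>' comparison).
def Pre_calculate_free_time_py (events : List (List (String × List (String × String)))) (time_min : String) (time_max : String) : Prop :=
  ∀ event ∈ events,
    (((List.lookup "start" event).bind (fun d => (List.lookup "dateTime" d).orElse (fun _ => List.lookup "date" d))).isSome = true) ∧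
    (((List.lookup "end" event).bind (fun d => (List.lookup "dateTime" d).orElse (fun _ => List.lookup "date" d))).isSome = true)
instance (events : List (List (String × List (String × String)))) (time_min : String) (time_max : String) : Decidable (Pre_calculate_free_time_py events time_min time_max) := by unfold Pre_calculate_free_time_py; infer_instance

def pvWitness_calculate_free_time_py : (List (List (String × List (String × String)))) × String × String :=
  ([[("start", [("dateTime", "b")]), ("end", [("date", "c")])]], "a", "d")

def Spec_calculate_free_time_py (events : List (List (String × List (String × String)))) (time_min : String) (time_max : String) (out : List (List (String × String))) : Prop := out = calculate_free_time_py_alt events time_min time_max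
instance (events : List (List (String × List (String × String)))) (time_min : String) (time_max : String) (out : List (List (String × String))) : Decidable (Spec_calculate_free_time_py events time_min time_max out) := by unfold Spec_calculate_free_time_py; infer_instance

-- ===== CLAIM (what is proved, stated in full; the proofs are below) =====
def Claim_equal_calculate_free_time_py : Prop := ∀ (events : List (List (String × List (String × String)))) (time_min : String) (time_max : String), Dom_calculate_free_time_py events time_min time_max → Pre_calculate_free_time_py events time_min time_max → Spec_calculate_free_time_py events time_min time_max (calculate_free_time_py events time_min time_max)

-- ===== LEMMAS AND PROOFS =====

theorem pvWhenB_eq_A : pvWhenB = pvResolveA := rfl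

-- tail of B after the running point prev: the slot before the next event (or time_max) plus the rest
def pvTail (tmax prev : String) : List (List (String × List (String × String))) → List (List (String × String))
  | [] => pvSlotB prev tmax
  | e :: es => pvSlotB prev (pvWhenB e "start") ++ pvGapsB tmax (e :: es)

theorem pvGaps_cons (tmax : String) (e : List (String × List (String × String)))
    (es : List (List (String × List (String × String)))) :
    pvGapsB tmax (e :: es) = pvTail tmax (pvWhenB e "end") es := by
  cases es with
  | nil => rfl
  | cons e2 rest => rfl

-- A's loop (with accumulator acc and running prev) equals B's adjacent-pair recursion, for any acc/prev.
theorem pv_core (events : List (List (String × List (String × String))))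
    (acc : List (List (String × String))) (prev tmax : String) :
    (let st := events.foldl
        (fun (st : List (List (String × String)) × String) event =>
          let start := pvResolveA event "start"
          let slots := if st.2 < start then st.1 ++ [[("start", st.2), ("end", start)]] else st.1
          (slots, pvResolveA event "end"))
        (acc, prev)
      if st.2 < tmax then st.1 ++ [[("start", st.2), ("end", tmax)]] else st.1)
    = acc ++ pvTail tmax prev events := by
  induction events generalizing acc prev with
  | nil =>
      simp only [List.foldl_nil, pvTail, pvSlotB]
      split_ifs with h <;> simp
  | cons e es ih =>
      simp only [List.foldl_cons]
      rw [ih]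
      rw [pvTail, pvGaps_cons, pvWhenB_eq_A]
      by_cases h : prev < pvResolveA e "start" <;>
        simp [h, pvSlotB, List.append_assoc]

-- ===== VERDICT (by name: the statement is the Claim_ definition above) =====
theorem calculate_free_time_py_spec : Claim_equal_calculate_free_time_py := by
  intro events time_min time_max _ _
  unfold Spec_calculate_free_time_py calculate_free_time_py calculate_free_time_py_alt
  cases events with
  | nil => rfl
  | cons e es =>
      simp only [List.isEmpty_cons, if_false, Bool.false_eq_true]
      rw [pv_core (e :: es) [] time_min time_max]
      rw [pvTail]
      simp
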